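-- pv_equiv track=rewrite | github.com/Guilhermepp4/LA-II | Treinos/Treino 4/Treino 1/amigos.py | extensions
-- ===== SOURCE A (Python) =====
-- def extensions(c, conhecidos):
--     if not c:
--         return conhecidos
--     l = []
--     for conhecido in filter(lambda x: x > c[-1], conhecidos):
--         flag = True
--         for x in c:
--             if conhecido not in conhecidos[x]:
--                 flag = False
--                 break
--         if flag:
--             l.append(conhecido)
--
--     return l
-- ===== SOURCE B (Python) =====
-- def extensions(c, conhecidos):
--     if not c:
--         return conhecidos
--     common = set(conhecidos.get(c[0], ()))
--     for x in c[1:]: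
--         common &= set(conhecidos.get(x, ()))
--     last = c[-1]
--     return [k for k in conhecidos if k > last and k in common]
-- ===== Notes on version B (the rewrite author's own statement) =====
-- stated objective: simpler
-- what changed: Instead of re-scanning every clique member's adjacency list for each candidate, B intersects the adjacency sets of all clique members once into a single 'common' set and then filters the candidates in one pass.
-- outside the precondition, e.g. on extensions([], {0: [1]}): A returns {0: [1]}, B returns {0: [1]}
import Mathlib
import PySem

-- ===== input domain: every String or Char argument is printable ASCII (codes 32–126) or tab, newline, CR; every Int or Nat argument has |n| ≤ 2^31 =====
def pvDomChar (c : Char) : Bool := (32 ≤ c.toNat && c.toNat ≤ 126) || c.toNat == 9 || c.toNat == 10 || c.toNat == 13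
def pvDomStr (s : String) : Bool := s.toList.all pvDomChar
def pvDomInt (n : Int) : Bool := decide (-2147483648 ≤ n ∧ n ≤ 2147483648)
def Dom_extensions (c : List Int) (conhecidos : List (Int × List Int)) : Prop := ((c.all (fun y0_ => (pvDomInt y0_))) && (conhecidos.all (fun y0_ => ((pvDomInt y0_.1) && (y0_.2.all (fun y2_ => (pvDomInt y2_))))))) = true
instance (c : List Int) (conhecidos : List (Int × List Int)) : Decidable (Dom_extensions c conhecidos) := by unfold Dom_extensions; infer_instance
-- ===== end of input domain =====

-- B intersects the adjacency sets of all clique members once into a single 'common' set and filters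
-- the candidates in one pass, instead of A's inner scan over the whole clique for every candidate.

-- ===== PORT A =====
-- inner 'for x in c' loop: flag stays True until some adjacency list misses `conhecido`.
-- `d.get? x = none` is Python's KeyError (excluded by Pre_); the port returns false there.
def extChecks (c : List Int) (conhecido : Int) (d : PySem.Dict Int (List Int)) : Bool :=
  match c with
  | [] => true
  | x :: rest =>
    match d.get? x with
    | none => false
    | some adj => if conhecido ∈ adj then extChecks rest conhecido d else false

def extensions (c : List Int) (conhecidos : List (Int × List Int)) : List Int :=
  if c = [] then [] -- Python returns the dict `conhecidos` here (not a value of type List Int); excluded by Pre_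
  else
    let d := PySem.Dict.mk conhecidos
    let last := (PySem.List.pyGet? c (-1)).getD 0  -- c[-1]; in range since c ≠ []
    (d.keys.filter (fun k => decide (last < k))).foldl
      (fun l conhecido => if extChecks c conhecido d then l ++ [conhecido] else l) []

-- ===== PORT B =====
def extensions_alt (c : List Int) (conhecidos : List (Int × List Int)) : List Int :=
  match c with
  | [] => [] -- Python returns the dict `conhecidos` here (not a value of type List Int); excluded by Pre_
  | x0 :: rest =>
    let d := PySem.Dict.mk conhecidos
    let common := rest.foldl
      (fun s x => PySem.Set.inter s (PySem.Set.ofList (d.getD x [])))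
      (PySem.Set.ofList (d.getD x0 []))
    let last := (PySem.List.pyGet? (x0 :: rest) (-1)).getD 0  -- c[-1]
    d.keys.filter (fun k => decide (last < k) && PySem.Set.contains common k)

-- ===== PRECONDITION & SPEC =====
-- Pre_ excludes (a) c = [], where A returns the dict itself (not a value of the declared List Int
-- type), and (b) the inputs where A raises KeyError: some clique member is missing from conhecidos
-- AND some key above c[-1] lies in every adjacency list of the clique prefix before the first
-- missing member, so A's inner loop reaches the missing lookup.
def Pre_extensions (c : List Int) (conhecidos : List (Int × List Int)) : Prop :=
  c ≠ [] ∧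
    ((∀ x ∈ c, (PySem.Dict.mk conhecidos).contains x = true) ∨
      ∀ k ∈ (PySem.Dict.mk conhecidos).keys, c.getLastD 0 < k →
        ∃ x ∈ c.takeWhile (fun x => (PySem.Dict.mk conhecidos).contains x),
          k ∉ (PySem.Dict.mk conhecidos).getD x [])
instance (c : List Int) (conhecidos : List (Int × List Int)) : Decidable (Pre_extensions c conhecidos) := by unfold Pre_extensions; infer_instance

def pvWitness_extensions : List Int × (List (Int × List Int)) := ([0, 1], [(0, [1, 2]), (1, [0, 2]), (2, [0, 1])])

def Spec_extensions (c : List Int) (conhecidos : List (Int × List Int)) (out : List Int) : Prop := out = extensions_alt c conhecidos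
instance (c : List Int) (conhecidos : List (Int × List Int)) (out : List Int) : Decidable (Spec_extensions c conhecidos out) := by unfold Spec_extensions; infer_instance

-- ===== CLAIM (what is proved, stated in full; the proofs are below) =====
def Claim_equal_extensions : Prop := ∀ (c : List Int) (conhecidos : List (Int × List Int)), Dom_extensions c conhecidos → Pre_extensions c conhecidos → Spec_extensions c conhecidos (extensions c conhecidos)

-- ===== LEMMAS AND PROOFS =====

-- membership in the iterated intersection
theorem mem_foldl_inter {g : Int → List Int} (rest : List Int) (s : PySem.Set Int) (k : Int) :
    (k ∈ rest.foldl (fun s x => PySem.Set.inter s (PySem.Set.ofList (g x))) s) ↔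
      (k ∈ s ∧ ∀ x ∈ rest, k ∈ g x) := by
  induction rest generalizing s with
  | nil => simp
  | cons x xs ih =>
    simp only [List.foldl_cons, ih, PySem.Set.mem_inter, PySem.Set.mem_ofList, List.mem_cons]
    constructor
    · rintro ⟨⟨hs, hx⟩, h⟩
      refine ⟨hs, ?_⟩
      rintro y (rfl | hy)
      · exact hx
      · exact h y hy
    · rintro ⟨hs, h⟩
      exact ⟨⟨hs, h x (Or.inl rfl)⟩, fun y hy => h y (Or.inr hy)⟩

-- A's inner loop agrees with "k is in every clique member's adjacency list (defaulting to [])":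
-- a missing key makes extChecks false, and also makes the quantified membership false.
theorem extChecks_iff (c : List Int) (k : Int) (d : PySem.Dict Int (List Int)) :
    extChecks c k d = true ↔ ∀ x ∈ c, k ∈ d.getD x [] := by
  induction c with
  | nil => simp [extChecks]
  | cons x rest ih =>
    simp only [extChecks, List.mem_cons]
    cases hg : d.get? x with
    | none =>
      have hgetD : d.getD x [] = [] := PySem.Dict.getD_of_get?_eq_none _ _ hg
      constructor
      · intro hfalse; cases hfalse
      · intro hall
        have := hall x (Or.inl rfl)
        rw [hgetD] at this
        cases this
    | some adj =>
      have hgetD : d.getD x [] = adj := PySem.Dict.getD_of_get?_eq_some _ _ hg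
      by_cases hk : k ∈ adj
      · simp only [if_pos hk, ih]
        constructor
        · intro hall y hy
          rcases hy with rfl | hy
          · rwa [hgetD]
          · exact hall y hy
        · intro hall y hy
          exact hall y (Or.inr hy)
      · simp only [if_neg hk]
        constructor
        · intro hfalse; cases hfalse
        · intro hall
          exact absurd (hgetD ▸ hall x (Or.inl rfl)) hk

-- the two ports agree on every nonempty clique (Pre_'s other clause only rules out Python A's KeyError)
theorem ports_agree (x0 : Int) (rest : List Int) (conhecidos : List (Int × List Int)) :
    extensions (x0 :: rest) conhecidos = extensions_alt (x0 :: rest) conhecidos := by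
  unfold extensions extensions_alt
  simp only [if_neg (List.cons_ne_nil x0 rest)]
  rw [PySem.List.foldl_append_if_eq_filter, List.nil_append, List.filter_filter]
  apply List.filter_congr
  intro k _
  rw [Bool.and_comm]
  congr 1
  rw [Bool.eq_iff_iff, extChecks_iff, PySem.Set.contains_eq_listContains]
  simp only [List.contains_iff_mem]
  rw [mem_foldl_inter, PySem.Set.mem_ofList]
  exact List.forall_mem_cons

-- ===== VERDICT (by name: the statement is the Claim_ definition above) =====
theorem extensions_spec : Claim_equal_extensions := by
  intro c conhecidos _ hpre
  obtain ⟨hne, -⟩ := hpre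
  cases c with
  | nil => exact absurd rfl hne
  | cons x0 rest => exact ports_agree x0 rest conhecidos
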